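-- pv_equiv track=rewrite | github.com/pawel3ala/swm2020 | main.py | solve
-- ===== SOURCE A (Python) =====
-- def findPrimes(n):
--     """
--     Algo based on Sieve of Eratosthenes
--
--     :param n: int
--     :return: list of calculated prime numbers, that are found in (1,n]
--
--     """
--     prime = [False] * 2 + [True] * n
--
--     p = 2
--     while p * p <= n:
--         if prime[p]:
--             for i in range(p * p, n + 2, p):
--                 prime[i] = False
--         p += 1
--
--     res = [p for p in range(2, n+1) if prime[p]]
--     return res
--
-- def solve(A, B):
--     """
--     :param A: list
--     :param B: list
--     :return: list
--
--     time complexity: O(A * B * F * log(log(F) )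
--     A - number of elements in seq A
--     B - number of elements in seq B
--     F - the highest frequency of a number that is both present in B and A
--
--     space complexity: O(A * K * F )
--     A - number of elements in A, without duplicates
--     K - number of elements that are both in A and B
--     F - the highest frequency of a number that is both present in B and A (used by findPrimes func)
--     """
--
--     A_set = set(A)              # helper hash set
--     B_freq = {}                 # helper hash map
--     found_primes = set()        # the helper hash set containing primes
--     # the highest frequency of a number that is both present in B and A
--     B_max_freq = 0
--     C = []                      # result
--
--     for n in B:
--         if n not in A_set:
--             pass
--         elif n in B_freq:
--             B_freq[n] += 1
--             B_max_freq = max(B_max_freq, B_freq[n])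
--         else:
--             B_freq[n] = 1
--
--     found_primes = set(findPrimes(B_max_freq))
--
--     def check(n):
--         """
--         Checks if given n is in B sequence, p times, where p is any prime number
--         :param n:
--         :return: bool
--         """
--         return True if B_freq.get(n, None) in found_primes else False
--
--     for num in A:
--         if not check(num):
--             C.append(num)
--
--     return C
-- ===== SOURCE B (Python) =====
-- def solve(A, B):
--     freq = {}
--     for n in B:
--         freq[n] = freq.get(n, 0) + 1
--
--     def is_prime(f):
--         if f < 2:
--             return False
--         i = 2
--         while i * i <= f:
--             if f % i == 0:
--                 return False
--             i += 1
--         return True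
--
--     return [num for num in A if not is_prime(freq.get(num, 0))]
-- ===== Notes on version B (the rewrite author's own statement) =====
-- stated objective: simpler
-- what changed: Replaces the sieve of Eratosthenes over all frequencies up to the maximum (plus the A-membership-filtered frequency map and the prime set) by a plain Counter of B and a direct trial-division primality test applied to each queried frequency.
import Mathlib
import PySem

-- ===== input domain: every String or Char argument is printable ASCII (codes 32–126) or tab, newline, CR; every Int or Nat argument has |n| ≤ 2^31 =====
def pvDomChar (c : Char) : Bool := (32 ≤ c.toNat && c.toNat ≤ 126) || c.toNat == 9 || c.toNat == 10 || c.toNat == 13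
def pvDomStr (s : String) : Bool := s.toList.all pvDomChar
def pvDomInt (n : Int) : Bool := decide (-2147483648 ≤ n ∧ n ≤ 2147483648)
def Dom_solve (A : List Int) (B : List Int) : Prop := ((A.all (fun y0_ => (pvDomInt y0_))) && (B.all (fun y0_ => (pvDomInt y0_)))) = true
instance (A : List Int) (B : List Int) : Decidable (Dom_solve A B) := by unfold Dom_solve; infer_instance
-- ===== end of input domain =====

-- B replaces A's sieve of Eratosthenes + prefiltered frequency map + prime set by a plain
-- counter of B and direct trial-division primality tests (objective: simpler).

-- ===== PORT A =====
-- inner 'for i in range(p*p, n+2, p): prime[i] = False' (every touched index is in range, so pySetD is exact)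
def sieveMark (l : List Bool) (a b s : Int) : List Bool :=
  (PySem.List.pyRange a b s).foldl (fun l i => PySem.List.pySetD l i false) l

-- 'while p*p <= n: if prime[p]: mark; p += 1' (prime[p] is in range at every reached p, so pyGetD is exact)
def sieveLoop (n : Int) (l : List Bool) (p : Int) : List Bool :=
  if h : p * p ≤ n then
    sieveLoop n (if PySem.List.pyGetD l p false then sieveMark l (p * p) (n + 2) p else l) (p + 1)
  else l
termination_by (n + 2 - p).toNat
decreasing_by
  have hp : p ≤ p * p := by nlinarith [mul_self_nonneg p, mul_self_nonneg (p - 1)]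
  omega

-- findPrimes(n); '[False]*2 + [True]*n' is the two-false prefix plus n.toNat trues (Python's * clamps negatives to [])
def findPrimes (n : Int) : List Int :=
  let l := sieveLoop n ([false, false] ++ List.replicate n.toNat true) 2
  (PySem.List.pyRange 2 (n + 1) 1).filter (fun q => PySem.List.pyGetD l q false)

-- one iteration of A's 'for n in B' loop over the state (B_freq, B_max_freq);
-- 'B_freq[n] += 1' reads the existing entry, ported as getD (the key is present on that branch, so getD is exact)
def solveStep (Aset : PySem.Set Int) (s : PySem.Dict Int Int × Int) (n : Int) : PySem.Dict Int Int × Int :=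
  if ¬ PySem.Set.contains Aset n then s
  else if s.1.contains n then
    let v := s.1.getD n 0 + 1
    (s.1.insert n v, max s.2 v)
  else (s.1.insert n 1, s.2)

def solve (A : List Int) (B : List Int) : List Int :=
  let Aset := PySem.Set.ofList A
  let st := B.foldl (solveStep Aset) (PySem.Dict.empty, 0)
  let foundPrimes := PySem.Set.ofList (findPrimes st.2)
  -- check(n): 'B_freq.get(n, None) in found_primes' — None is never a member of a set of ints
  let check : Int → Bool := fun n =>
    match st.1.get? n with
    | some f => PySem.Set.contains foundPrimes f
    | none => false
  A.foldl (fun C num => if !check num then C ++ [num] else C) []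

-- ===== PORT B =====
-- 'while i*i <= f: if f % i == 0: return False; i += 1'
def isPrimeLoop (f : Int) (i : Int) : Bool :=
  if h : i * i ≤ f then
    if PySem.Int.mod f i == 0 then false else isPrimeLoop f (i + 1)
  else true
termination_by (f + 2 - i).toNat
decreasing_by
  have hp : i ≤ i * i := by nlinarith [mul_self_nonneg i, mul_self_nonneg (i - 1)]
  omega

def isPrime (f : Int) : Bool :=
  if f < 2 then false else isPrimeLoop f 2

def solve_alt (A : List Int) (B : List Int) : List Int :=
  let freq := B.foldl (fun d n => d.insert n (d.getD n 0 + 1)) PySem.Dict.empty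
  A.filter (fun num => !isPrime (freq.getD num 0))

-- ===== PRECONDITION & SPEC =====
def Spec_solve (A : List Int) (B : List Int) (out : List Int) : Prop := out = solve_alt A B
instance (A : List Int) (B : List Int) (out : List Int) : Decidable (Spec_solve A B out) := by unfold Spec_solve; infer_instance

-- ===== CLAIM (what is proved, stated in full; the proofs are below) =====
def Claim_equal_solve : Prop := ∀ (A : List Int) (B : List Int), Dom_solve A B → Spec_solve A B (solve A B)

-- ===== LEMMAS AND PROOFS =====

-- a divisor d with 2 ≤ d and d*d ≤ c is a proper divisor
lemma lt_of_sq_le {d c : Int} (hd : 2 ≤ d) (h : d * d ≤ c) : d < c := by nlinarith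

-- if c is not prime it has a prime divisor d with d*d ≤ c
lemma exists_prime_div_of_not_prime {c : Int} (hc : 2 ≤ c) (h : ¬ Nat.Prime c.toNat) :
    ∃ d : Int, 2 ≤ d ∧ Nat.Prime d.toNat ∧ d ∣ c ∧ d * d ≤ c := by
  set k := c.toNat with hk
  have hck : c = (k : Int) := by omega
  have hm : (k.minFac).Prime := Nat.minFac_prime (by omega)
  have hsq : k.minFac ^ 2 ≤ k := Nat.minFac_sq_le_self (by omega) h
  refine ⟨(k.minFac : Int), by exact_mod_cast hm.two_le, ?_, ?_, ?_⟩
  · simpa using hm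
  · rw [hck]; exact_mod_cast Nat.minFac_dvd k
  · rw [hck]; nlinarith [hsq]

-- a prime has no divisor d with 2 ≤ d and d*d ≤ c
lemma not_div_of_prime {c : Int} (hc : 2 ≤ c) (h : Nat.Prime c.toNat) :
    ∀ d : Int, 2 ≤ d → d * d ≤ c → ¬ d ∣ c := by
  intro d hd2 hdd hdvd
  have hdc : d < c := by nlinarith
  have : d.toNat ∣ c.toNat := by
    have h1 : ((d.toNat : Int)) ∣ ((c.toNat : Int)) := by
      rwa [Int.toNat_of_nonneg (by omega), Int.toNat_of_nonneg (by omega)]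
    exact_mod_cast h1
  rcases (Nat.Prime.eq_one_or_self_of_dvd h _ this) with h1 | h1 <;> omega

lemma prime_iff_no_prime_small_divisor {c : Int} (hc : 2 ≤ c) :
    Nat.Prime c.toNat ↔ ¬ ∃ d : Int, 2 ≤ d ∧ Nat.Prime d.toNat ∧ d ∣ c ∧ d * d ≤ c := by
  constructor
  · rintro hp ⟨d, hd2, _, hdvd, hdd⟩
    exact not_div_of_prime hc hp d hd2 hdd hdvd
  · intro hne
    by_contra h
    exact hne (exists_prime_div_of_not_prime hc h)

-- trial-division loop characterisation
lemma isPrimeLoop_spec (f : Int) : ∀ i : Int, 2 ≤ i →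
    (isPrimeLoop f i = true ↔ ∀ d : Int, i ≤ d → d * d ≤ f → ¬ d ∣ f) := by
  intro i
  induction i using isPrimeLoop.induct f with
  | case1 i hle hmod =>
    intro h2
    rw [isPrimeLoop, dif_pos hle, if_pos hmod]
    have hdvd : i ∣ f := (PySem.Int.mod_eq_zero_iff_dvd f i).mp (by simpa using hmod)
    exact iff_of_false (by simp) (fun h => h i le_rfl hle hdvd)
  | case2 i hle hmod ih =>
    intro h2
    rw [isPrimeLoop, dif_pos hle, if_neg hmod]
    rw [ih (by omega)]
    constructor
    · intro h d hd hdd hdvd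
      rcases eq_or_lt_of_le hd with heq | hlt
      · subst heq
        exact hmod (by rw [beq_iff_eq]; exact (PySem.Int.mod_eq_zero_iff_dvd f i).mpr hdvd)
      · exact h d (by omega) hdd hdvd
    · intro h d hd hdd hdvd
      exact h d (by omega) hdd hdvd
  | case3 i hle =>
    intro h2
    rw [isPrimeLoop, dif_neg hle]
    refine iff_of_true rfl (fun d hd hdd hdvd => ?_)
    have : i * i ≤ d * d := by nlinarith
    omega

lemma isPrime_iff (c : Int) : isPrime c = true ↔ 2 ≤ c ∧ Nat.Prime c.toNat := by
  unfold isPrime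
  split_ifs with h
  · exact iff_of_false (by simp) (fun hc => by omega)
  · rw [isPrimeLoop_spec c 2 (by omega)]
    constructor
    · intro hnd
      refine ⟨by omega, ?_⟩
      by_contra hnp
      obtain ⟨d, hd2, _, hdvd, hdd⟩ := exists_prime_div_of_not_prime (by omega) hnp
      exact hnd d hd2 hdd hdvd
    · rintro ⟨hc, hp⟩ d hd hdd
      exact not_div_of_prime hc hp d hd hdd

-- ---------- sieve ----------

-- cell values after folding pySetD-false over a list of nonnegative in-range indices
lemma foldl_pySetD_get (L : List Int) : ∀ (l : List Bool) (i : Int),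
    (∀ j ∈ L, 0 ≤ j ∧ j < l.length) → 0 ≤ i → i < l.length →
    PySem.List.pyGetD (L.foldl (fun l j => PySem.List.pySetD l j false) l) i false
      = if i ∈ L then false else PySem.List.pyGetD l i false := by
  induction L with
  | nil => intro l i _ _ _; simp
  | cons j L ih =>
    intro l i hjs hi0 hil
    obtain ⟨hj0, hjl⟩ := hjs j (by simp)
    have hlen : (PySem.List.pySetD l j false).length = l.length :=
      PySem.List.length_pySetD l j false
    rw [List.foldl_cons,
      ih _ i (fun a ha => by rw [hlen]; exact hjs a (by simp [ha])) hi0 (by rw [hlen]; exact hil)]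
    have hget : PySem.List.pyGetD (PySem.List.pySetD l j false) i false
        = if i = j then false else PySem.List.pyGetD l i false := by
      rw [PySem.List.pySetD_of_nonneg l false hj0,
        PySem.List.pyGetD_eq_getElem _ _ hi0 (by simpa [hlen] using hil),
        PySem.List.pyGetD_eq_getElem _ _ hi0 (by simpa using hil)]
      rw [List.getElem_set]
      by_cases hij : i = j
      · rw [if_pos (by omega), if_pos hij]
      · rw [if_neg (by omega), if_neg hij]
    rw [hget]
    by_cases hiL : i ∈ L
    · simp [hiL]
    · by_cases hij : i = j <;> simp [hiL, hij]

lemma length_foldl_pySetD (L : List Int) : ∀ (l : List Bool),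
    (L.foldl (fun l j => PySem.List.pySetD l j false) l).length = l.length := by
  intro l
  induction L generalizing l with
  | nil => rfl
  | cons j L ih => simp [List.foldl_cons, ih, PySem.List.length_pySetD]

-- sieve invariant: after the loop has processed all p' < P, a cell i is still true
-- exactly when i ≥ 2 and no prime d < P with d*d ≤ i divides i
def SInv (n P : Int) (l : List Bool) : Prop :=
  l.length = n.toNat + 2 ∧
  ∀ i : Int, 0 ≤ i → i < l.length →
    (PySem.List.pyGetD l i false = true ↔
      2 ≤ i ∧ ¬ ∃ d : Int, 2 ≤ d ∧ d < P ∧ Nat.Prime d.toNat ∧ d ∣ i ∧ d * d ≤ i)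

lemma SInv_init (n : Int) : SInv n 2 ([false, false] ++ List.replicate n.toNat true) := by
  constructor
  · simp
  · intro i hi0 hil
    simp only [List.length_append, List.length_cons, List.length_nil,
      List.length_replicate] at hil
    rw [PySem.List.pyGetD_eq_getElem _ _ hi0 (by simp; omega)]
    have hne : ¬ ∃ d : Int, 2 ≤ d ∧ d < 2 ∧ Nat.Prime d.toNat ∧ d ∣ i ∧ d * d ≤ i := by
      rintro ⟨d, h1, h2, -⟩; omega
    rcases Int.lt_or_le i 2 with h | h
    · interval_cases i <;> simp
    · have h2 : 2 ≤ i.toNat := by omega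
      rw [List.getElem_append_right (by simpa using h2)]
      simp only [List.getElem_replicate]
      exact iff_of_true trivial ⟨h, hne⟩

lemma SInv_step (n p : Int) (l : List Bool) (h2 : 2 ≤ p) (hpn : p * p ≤ n) (hI : SInv n p l) :
    SInv n (p + 1) (if PySem.List.pyGetD l p false then sieveMark l (p * p) (n + 2) p else l) := by
  obtain ⟨hlen, hget⟩ := hI
  have hn0 : (0:Int) ≤ n := by nlinarith
  have hppn : p ≤ n := by nlinarith
  have hnn : (n.toNat : Int) = n := Int.toNat_of_nonneg hn0
  have hpl : p < (l.length : Int) := by rw [hlen]; push_cast [hnn]; omega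
  have hcellp : PySem.List.pyGetD l p false = true ↔ Nat.Prime p.toNat := by
    rw [hget p (by omega) hpl, prime_iff_no_prime_small_divisor h2]
    constructor
    · rintro ⟨-, hne⟩ ⟨d, hd2, hdp, hdvd, hdd⟩
      exact hne ⟨d, hd2, lt_of_sq_le hd2 hdd, hdp, hdvd, hdd⟩
    · rintro hne
      refine ⟨h2, ?_⟩
      rintro ⟨d, hd2, _, hdp, hdvd, hdd⟩
      exact hne ⟨d, hd2, hdp, hdvd, hdd⟩
  by_cases hc : PySem.List.pyGetD l p false = true
  · have hp : Nat.Prime p.toNat := hcellp.mp hc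
    rw [if_pos hc]
    have hmem : ∀ j : Int, j ∈ PySem.List.pyRange (p * p) (n + 2) p ↔ p * p ≤ j ∧ j < n + 2 ∧ p ∣ j := by
      intro j
      rw [PySem.List.mem_pyRange_iff_of_pos (by omega)]
      constructor
      · rintro ⟨ha, hb, hd⟩
        refine ⟨ha, hb, ?_⟩
        have := dvd_add hd (Dvd.intro p rfl)
        simpa using this
      · rintro ⟨ha, hb, hd⟩
        exact ⟨ha, hb, dvd_sub hd (Dvd.intro p rfl)⟩
    have hrange : ∀ j ∈ PySem.List.pyRange (p * p) (n + 2) p, 0 ≤ j ∧ j < (l.length : Int) := by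
      intro j hj
      rw [hmem j] at hj
      constructor
      · nlinarith [hj.1]
      · rw [hlen]; push_cast [hnn]; omega
    constructor
    · unfold sieveMark; rw [length_foldl_pySetD]; exact hlen
    · intro i hi0 hil
      unfold sieveMark at hil ⊢
      rw [length_foldl_pySetD] at hil
      rw [foldl_pySetD_get _ l i (by exact_mod_cast hrange) hi0 (by exact_mod_cast hil)]
      by_cases him : i ∈ PySem.List.pyRange (p * p) (n + 2) p
      · refine iff_of_false (by simp [him]) ?_
        rintro ⟨hi2, hne⟩
        rw [hmem i] at him
        exact hne ⟨p, h2, by omega, hp, him.2.2, him.1⟩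
      · rw [if_neg him, hget i hi0 hil]
        have hnotm : ¬ (p * p ≤ i ∧ p ∣ i) := by
          intro hcon
          exact him ((hmem i).mpr ⟨hcon.1, by rw [hlen] at hil; push_cast [hnn] at hil; omega, hcon.2⟩)
        constructor
        · rintro ⟨hi2, hne⟩
          refine ⟨hi2, ?_⟩
          rintro ⟨d, hd2, hdlt, hdp, hdvd, hdd⟩
          rcases Int.lt_or_le d p with hlt | hge
          · exact hne ⟨d, hd2, hlt, hdp, hdvd, hdd⟩
          · have : d = p := by omega
            subst this
            exact hnotm ⟨hdd, hdvd⟩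
        · rintro ⟨hi2, hne⟩
          exact ⟨hi2, fun ⟨d, hd2, hdlt, hdp, hdvd, hdd⟩ => hne ⟨d, hd2, by omega, hdp, hdvd, hdd⟩⟩
  · have hp : ¬ Nat.Prime p.toNat := fun h => hc (hcellp.mpr h)
    rw [if_neg hc]
    refine ⟨hlen, fun i hi0 hil => ?_⟩
    rw [hget i hi0 hil]
    constructor
    · rintro ⟨hi2, hne⟩
      refine ⟨hi2, ?_⟩
      rintro ⟨d, hd2, hdlt, hdp, hdvd, hdd⟩
      rcases Int.lt_or_le d p with hlt | hge
      · exact hne ⟨d, hd2, hlt, hdp, hdvd, hdd⟩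
      · have : d = p := by omega
        subst this
        exact hp hdp
    · rintro ⟨hi2, hne⟩
      exact ⟨hi2, fun ⟨d, hd2, hdlt, hdp, hdvd, hdd⟩ => hne ⟨d, hd2, by omega, hdp, hdvd, hdd⟩⟩

lemma sieveLoop_spec (n : Int) : ∀ (l : List Bool) (p : Int), 2 ≤ p → SInv n p l →
    ∀ i : Int, 2 ≤ i → i ≤ n →
      (PySem.List.pyGetD (sieveLoop n l p) i false = true ↔ Nat.Prime i.toNat) := by
  intro l p
  induction l, p using sieveLoop.induct n with
  | case1 l p hle ih =>
    intro h2 hI i hi2 hin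
    rw [sieveLoop, dif_pos hle]
    exact ih (by omega) (SInv_step n p l h2 hle hI) i hi2 hin
  | case2 l p hle =>
    intro h2 hI i hi2 hin
    rw [sieveLoop, dif_neg hle]
    obtain ⟨hlen, hget⟩ := hI
    rw [hget i (by omega) (by rw [hlen]; push_cast [Int.toNat_of_nonneg (by omega : (0:Int) ≤ n)]; omega),
      prime_iff_no_prime_small_divisor hi2]
    constructor
    · rintro ⟨-, hne⟩ ⟨d, hd2, hdp, hdvd, hdd⟩
      have hdlt : d < p := by nlinarith
      exact hne ⟨d, hd2, hdlt, hdp, hdvd, hdd⟩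
    · rintro hne
      exact ⟨hi2, fun ⟨d, hd2, _, hdp, hdvd, hdd⟩ => hne ⟨d, hd2, hdp, hdvd, hdd⟩⟩

lemma mem_findPrimes (n : Int) (q : Int) :
    q ∈ findPrimes n ↔ 2 ≤ q ∧ q ≤ n ∧ Nat.Prime q.toNat := by
  unfold findPrimes
  simp only [List.mem_filter, PySem.List.mem_pyRange_one]
  constructor
  · rintro ⟨⟨h2, hlt⟩, hcell⟩
    exact ⟨h2, by omega,
      (sieveLoop_spec n _ 2 le_rfl (SInv_init n) q h2 (by omega)).mp hcell⟩
  · rintro ⟨h2, hle, hp⟩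
    exact ⟨⟨h2, by omega⟩,
      (sieveLoop_spec n _ 2 le_rfl (SInv_init n) q h2 (by omega)).mpr hp⟩

-- ---------- A's frequency-counting loop ----------

-- invariant of A's 'for n in B' loop: the dict stores exactly the positive counts of
-- elements of A seen so far, and every stored count is at most max m 1
def FInv (Aset : PySem.Set Int) (s : PySem.Dict Int Int × Int) (cnt : Int → Nat) : Prop :=
  (∀ x : Int, s.1.get? x =
      if PySem.Set.contains Aset x ∧ 0 < cnt x then some (cnt x : Int) else none)
  ∧ 0 ≤ s.2
  ∧ (∀ x : Int, PySem.Set.contains Aset x → (cnt x : Int) ≤ max s.2 1)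

lemma FInv_step (Aset : PySem.Set Int) (s : PySem.Dict Int Int × Int) (cnt : Int → Nat)
    (h : FInv Aset s cnt) (b : Int) :
    FInv Aset (solveStep Aset s b) (fun x => cnt x + if x = b then 1 else 0) := by
  obtain ⟨hget, hm, hmax⟩ := h
  by_cases hA : PySem.Set.contains Aset b = true
  · by_cases hb : s.1.contains b = true
    · have hcd : PySem.Set.contains Aset b = true ∧ 0 < cnt b := by
        by_contra hcd
        rw [PySem.Dict.contains_eq_isSome_get?, hget b, if_neg hcd] at hb
        simp at hb
      have hsome : s.1.get? b = some ((cnt b : Int)) := by rw [hget b, if_pos hcd]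
      have hgd : s.1.getD b 0 = (cnt b : Int) :=
        PySem.Dict.getD_of_get?_eq_some s.1 0 hsome
      simp only [solveStep, hA, hb, not_true, if_true, if_false, hgd]
      refine ⟨?_, ?_, ?_⟩
      · intro x
        rw [PySem.Dict.get?_insert]
        by_cases hx : x = b
        · subst hx
          rw [if_pos rfl]
          rw [if_pos ⟨hA, by simp⟩]
          simp
        · rw [if_neg hx, hget x]
          simp [hx]
      · exact le_trans hm (le_max_left _ _)
      · intro x hx
        by_cases hxb : x = b
        · subst hxb
          push_cast
          omega
        · simp only [if_neg hxb, add_zero]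
          have h1 := hmax x hx
          have h2 : max s.2 1 ≤ max (max s.2 ((cnt b : Int) + 1)) 1 := by
            apply max_le_max_right
            exact le_max_left _ _
          exact le_trans h1 h2
    · have hnone : s.1.get? b = none := by
        rw [PySem.Dict.contains_eq_isSome_get?] at hb
        simpa using hb
      have hcnt0 : cnt b = 0 := by
        have h1 := hget b
        rw [hnone] at h1
        by_cases hcd : PySem.Set.contains Aset b = true ∧ 0 < cnt b
        · rw [if_pos hcd] at h1; simp at h1
        · have : ¬ 0 < cnt b := fun hpos => hcd ⟨hA, hpos⟩
          omega
      simp only [solveStep, hA, hb, not_true, Bool.false_eq_true, if_false]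
      refine ⟨?_, hm, ?_⟩
      · intro x
        rw [PySem.Dict.get?_insert]
        by_cases hx : x = b
        · subst hx
          rw [if_pos rfl]
          rw [if_pos ⟨hA, by simp⟩]
          simp [hcnt0]
        · rw [if_neg hx, hget x]
          simp [hx]
      · intro x hx
        by_cases hxb : x = b
        · subst hxb
          simp only [hcnt0]
          simp
        · simp only [if_neg hxb, add_zero]
          exact hmax x hx
  · have hstep : solveStep Aset s b = s := by
      unfold solveStep
      rw [if_pos hA]
    rw [hstep]
    refine ⟨?_, hm, ?_⟩
    · intro x
      rw [hget x]
      by_cases hx : x = b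
      · subst hx
        rw [if_neg (fun hc => hA hc.1), if_neg (fun hc => hA hc.1)]
      · simp [hx]
    · intro x hx
      by_cases hxb : x = b
      · subst hxb
        exact absurd hx hA
      · simp only [if_neg hxb, add_zero]
        exact hmax x hx

lemma FInv_foldl (Aset : PySem.Set Int) : ∀ (ys : List Int) (s : PySem.Dict Int Int × Int)
    (cnt : Int → Nat), FInv Aset s cnt →
    FInv Aset (ys.foldl (solveStep Aset) s) (fun x => cnt x + ys.count x) := by
  intro ys
  induction ys with
  | nil => intro s cnt h; simpa using h
  | cons b ys ih =>
    intro s cnt h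
    rw [List.foldl_cons]
    have := ih (solveStep Aset s b) _ (FInv_step Aset s cnt h b)
    have hfun : (fun x => (cnt x + if x = b then 1 else 0) + ys.count x)
        = (fun x => cnt x + (b :: ys).count x) := by
      funext x
      rw [List.count_cons]
      by_cases hx : x = b <;> simp [hx, beq_iff_eq] <;> omega
    rwa [hfun] at this

-- ---------- assembly ----------

lemma check_eq_isPrime (A B : List Int) (num : Int) (hnum : num ∈ A) :
    (match (B.foldl (solveStep (PySem.Set.ofList A)) (PySem.Dict.empty, 0)).1.get? num with
      | some f => PySem.Set.contains (PySem.Set.ofList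
          (findPrimes (B.foldl (solveStep (PySem.Set.ofList A)) (PySem.Dict.empty, 0)).2)) f
      | none => false)
    = isPrime ((B.count num : Nat) : Int) := by
  have hinv := FInv_foldl (PySem.Set.ofList A) B (PySem.Dict.empty, 0) (fun _ => 0)
    ⟨fun x => by simp [PySem.Dict.get?_empty], by simp, fun x _ => by simp⟩
  obtain ⟨hget, hm, hmax⟩ := hinv
  have hA : PySem.Set.contains (PySem.Set.ofList A) num = true := by
    rw [PySem.Set.contains_iff, PySem.Set.mem_ofList]
    exact hnum
  set st := B.foldl (solveStep (PySem.Set.ofList A)) (PySem.Dict.empty, 0) with hst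
  by_cases hc0 : B.count num = 0
  · rw [hget num, if_neg (by simp [hc0])]
    rw [hc0]
    simp [isPrime]
  · have hpos : 0 < B.count num := Nat.pos_of_ne_zero hc0
    rw [hget num, if_pos ⟨hA, by simpa using hpos⟩]
    simp only []
    apply Bool.coe_iff_coe.mp
    rw [PySem.Set.contains_iff, PySem.Set.mem_ofList, mem_findPrimes, isPrime_iff]
    have hbound := hmax num hA
    have hm2 := hm
    constructor
    · rintro ⟨h2, -, hp⟩
      exact ⟨by omega, by simpa using hp⟩
    · rintro ⟨h2, hp⟩
      refine ⟨by omega, ?_, by simpa using hp⟩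
      simp only [] at hbound
      push_cast at hbound h2 ⊢
      omega

-- ===== VERDICT (by name: the statement is the Claim_ definition above) =====
theorem solve_spec : Claim_equal_solve := by
  intro A B _
  unfold Spec_solve solve solve_alt
  simp only []
  rw [show (fun (C : List Int) num =>
        if !(match (B.foldl (solveStep (PySem.Set.ofList A)) (PySem.Dict.empty, 0)).1.get? num with
          | some f => PySem.Set.contains (PySem.Set.ofList
              (findPrimes (B.foldl (solveStep (PySem.Set.ofList A)) (PySem.Dict.empty, 0)).2)) f
          | none => false) then C ++ [num] else C)
      = (fun (C : List Int) num =>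
        if (fun n => !(match (B.foldl (solveStep (PySem.Set.ofList A)) (PySem.Dict.empty, 0)).1.get? n with
          | some f => PySem.Set.contains (PySem.Set.ofList
              (findPrimes (B.foldl (solveStep (PySem.Set.ofList A)) (PySem.Dict.empty, 0)).2)) f
          | none => false)) num then C ++ [(fun (x : Int) => x) num] else C) from rfl,
    PySem.List.foldl_append_if]
  rw [List.map_id', List.nil_append]
  apply List.filter_congr
  intro num hnum
  rw [check_eq_isPrime A B num hnum]
  rw [PySem.Dict.getD_foldl_insert_add_one B PySem.Dict.empty num]
  rw [PySem.Dict.getD_empty]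
  simp
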